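-- pv_equiv track=rewrite | github.com/tagore84/bga | backend/app/core/nim/ai_nim.py | select_move
-- ===== SOURCE A (Python) =====
-- from typing import Any, Dict
--
-- def select_move(state: Dict[str, Any]) -> dict:
--     """
--     Nim Misere AI Strategy (Optimal).
--     """
--     board = state.get("board", [])
--
--     # Calculate Nim-sum
--     nim_sum = 0
--     for count in board:
--         nim_sum ^= count
--
--     # Check if we are in the endgame case (all piles size 0 or 1)
--     piles_gt_1 = [i for i, c in enumerate(board) if c > 1]
--     is_endgame = (len(piles_gt_1) == 0)
--
--     move = None
--
--     if is_endgame: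
--         # End game strategy for Misere:
--         # We want to leave an ODD number of piles with size 1.
--         piles_1 = [i for i, c in enumerate(board) if c == 1]
--         count_1 = len(piles_1)
--
--         if count_1 % 2 == 1:
--             # Odd number of piles of size 1. Losing position.
--             move = {"pile_index": piles_1[0], "count": 1}
--         else:
--             # Even number of piles of size 1. Winning position.
--             move = {"pile_index": piles_1[0], "count": 1}
--
--     else:
--         # Normal play
--         if nim_sum != 0:
--             for i, count in enumerate(board):
--                 target = count ^ nim_sum
--                 if target < count:
--                     amount_to_remove = count - target
--
--                     # Misere transition check
--                     remaining_piles_gt_1 = 0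
--                     for j, c in enumerate(board):
--                         if j == i:
--                             if target > 1:
--                                 remaining_piles_gt_1 += 1
--                         else:
--                             if c > 1:
--                                 remaining_piles_gt_1 += 1
--
--                     if remaining_piles_gt_1 == 0:
--                         # This move forces endgame. Ensure ODD 1s.
--                         count_1s = 0
--                         for j, c in enumerate(board):
--                             val = target if j == i else c
--                             if val == 1:
--                                 count_1s += 1
--
--                         if count_1s % 2 == 0:
--                             # Adjust to leave ODD 1s
--                             p_board = list(board)
--                             p_board[i] -= amount_to_remove
--
--                             # We either remove 1 more or 1 less to toggle parity of 1s
--                             # If target was 0 ( removed 'amount'), make it 1 (remove amount-1)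
--                             # If target was 1 ( removed 'amount'), make it 0 (remove amount+1)
--                             if (count - amount_to_remove) == 0:
--                                  amount_to_remove -= 1
--                             else:
--                                  amount_to_remove += 1
--
--                     move = {"pile_index": i, "count": amount_to_remove}
--                     return move
--
--         if move is None:
--              # Losing position, take 1 from first available
--              for i, count in enumerate(board):
--                  if count > 0:
--                      return {"pile_index": i, "count": 1}
--
--     return move
-- ===== SOURCE B (Python) =====
-- from typing import Any, Dict
--
-- def select_move(state: Dict[str, Any]) -> dict:
--     """Nim Misere AI (optimal) — one pass of pile statistics, arithmetic instead of inner loops."""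
--     board = state.get("board", [])
--
--     # Single pass: nim-sum, number of piles > 1, number of piles == 1
--     nim = 0
--     big = 0
--     ones = 0
--     for c in board:
--         nim ^= c
--         if c > 1:
--             big += 1
--         if c == 1:
--             ones += 1
--
--     if big == 0:
--         # Endgame (all piles 0 or 1): take one stone from the first pile of size 1.
--         return {"pile_index": board.index(1), "count": 1}
--
--     if nim != 0:
--         for i, c in enumerate(board):
--             t = c ^ nim
--             if t < c:
--                 amount = c - t
--                 # this move leaves no pile > 1?
--                 if big - (1 if c > 1 else 0) + (1 if t > 1 else 0) == 0:
--                     count_1s = ones - (1 if c == 1 else 0) + (1 if t == 1 else 0)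
--                     if count_1s % 2 == 0:
--                         # toggle parity of the number of 1-piles
--                         amount = amount - 1 if t == 0 else amount + 1
--                 return {"pile_index": i, "count": amount}
--
--     # Losing position: take 1 from the first non-empty pile.
--     for i, c in enumerate(board):
--         if c > 0:
--             return {"pile_index": i, "count": 1}
-- ===== Notes on version B (the rewrite author's own statement) =====
-- stated objective: simpler
-- what changed: B computes the nim-sum together with the counts of piles > 1 and piles == 1 in one pass and replaces A's index-building comprehensions, the two inner counting loops of the winning branch and the duplicated endgame arms by arithmetic on those counts and a single board.index(1).
-- outside the precondition, e.g. on select_move({'board': [0, 0]}): A raises IndexError, B raises ValueError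
import Mathlib
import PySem

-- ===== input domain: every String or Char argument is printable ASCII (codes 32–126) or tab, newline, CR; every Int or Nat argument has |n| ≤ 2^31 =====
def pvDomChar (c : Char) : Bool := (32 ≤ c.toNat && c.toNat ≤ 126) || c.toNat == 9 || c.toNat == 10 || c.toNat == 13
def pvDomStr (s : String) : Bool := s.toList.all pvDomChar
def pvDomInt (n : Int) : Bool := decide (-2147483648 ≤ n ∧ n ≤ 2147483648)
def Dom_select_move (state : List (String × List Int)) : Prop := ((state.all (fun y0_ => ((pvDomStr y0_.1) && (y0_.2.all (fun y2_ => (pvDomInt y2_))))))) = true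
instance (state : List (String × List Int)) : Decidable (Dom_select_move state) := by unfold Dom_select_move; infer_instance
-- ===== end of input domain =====

-- B replaces A's two inner counting loops by arithmetic on pile statistics (counts of piles > 1
-- and piles == 1) computed in one pass together with the nim-sum; objective: simpler.

-- ===== PORT A =====
-- state.get("board", []) : first match in the association list (dict convention)
def pvBoard (state : List (String × List Int)) : List Int :=
  ((state.find? (fun p => p.1 == "board")).map Prod.snd).getD []

-- the 'for i, count in enumerate(board): target = count ^ nim_sum; if target < count: … return move'
-- loop of A's winning branch; inner 'for j, c in enumerate(board)' loops are folds over the same list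
def selectA_find (board : List Int) (nim : Int) : List (Int × Int) → Option (List (String × Int))
  | [] => none
  | (i, count) :: rest =>
    let target := PySem.Int.bxor count nim
    if target < count then
      let amount_to_remove := count - target
      let remaining_piles_gt_1 :=
        (PySem.List.enumerate board 0).foldl
          (fun acc jc =>
            acc + (if jc.1 = i then (if 1 < target then 1 else 0)
                   else (if 1 < jc.2 then 1 else 0))) (0 : Int)
      let amount_to_remove :=
        if remaining_piles_gt_1 = 0 then
          let count_1s :=
            (PySem.List.enumerate board 0).foldl
              (fun acc jc =>
                acc + (if (if jc.1 = i then target else jc.2) = 1 then 1 else 0)) (0 : Int)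
          if PySem.Int.mod count_1s 2 = 0 then
            (if count - amount_to_remove = 0 then amount_to_remove - 1 else amount_to_remove + 1)
          else amount_to_remove
        else amount_to_remove
      some [("pile_index", i), ("count", amount_to_remove)]
    else selectA_find board nim rest

-- the losing-position fallback loop: first pile with count > 0
def selectA_fallback : List (Int × Int) → Option (List (String × Int))
  | [] => none
  | (i, count) :: rest =>
    if 0 < count then some [("pile_index", i), ("count", 1)] else selectA_fallback rest

def select_move (state : List (String × List Int)) : List (String × Int) :=
  let board := pvBoard state
  let nim_sum := board.foldl (fun a c => PySem.Int.bxor a c) 0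
  let piles_gt_1 := ((PySem.List.enumerate board 0).filter (fun p => 1 < p.2)).map Prod.fst
  let is_endgame := piles_gt_1.length = 0
  if is_endgame then
    let piles_1 := ((PySem.List.enumerate board 0).filter (fun p => p.2 = 1)).map Prod.fst
    let count_1 := piles_1.length
    if count_1 % 2 = 1 then
      -- piles_1[0]; none = IndexError, excluded by Pre_
      match PySem.List.pyGet? piles_1 0 with
      | some i => [("pile_index", i), ("count", 1)]
      | none => []
    else
      match PySem.List.pyGet? piles_1 0 with
      | some i => [("pile_index", i), ("count", 1)]
      | none => []
  else
    match (if nim_sum ≠ 0 then selectA_find board nim_sum (PySem.List.enumerate board 0) else none) with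
    | some m => m
    | none =>
      match selectA_fallback (PySem.List.enumerate board 0) with
      | some m => m
      | none => []   -- Python would return None here; unreachable when not endgame

-- ===== PORT B =====
-- single statistics pass: (nim-sum, #piles > 1, #piles == 1)
def pvStats (board : List Int) : Int × Int × Int :=
  board.foldl
    (fun acc c =>
      (PySem.Int.bxor acc.1 c,
       acc.2.1 + (if 1 < c then 1 else 0),
       acc.2.2 + (if c = 1 then 1 else 0))) (0, 0, 0)

-- winning-branch scan with arithmetic instead of inner loops
def selectB_find (big ones nim : Int) : List (Int × Int) → Option (List (String × Int))
  | [] => none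
  | (i, c) :: rest =>
    let t := PySem.Int.bxor c nim
    if t < c then
      let amount := c - t
      let amount :=
        if big - (if 1 < c then 1 else 0) + (if 1 < t then 1 else 0) = 0 then
          let count_1s := ones - (if c = 1 then 1 else 0) + (if t = 1 then 1 else 0)
          if PySem.Int.mod count_1s 2 = 0 then (if t = 0 then amount - 1 else amount + 1)
          else amount
        else amount
      some [("pile_index", i), ("count", amount)]
    else selectB_find big ones nim rest

def selectB_fallback : List (Int × Int) → Option (List (String × Int))
  | [] => none
  | (i, c) :: rest =>
    if 0 < c then some [("pile_index", i), ("count", 1)] else selectB_fallback rest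

def select_move_alt (state : List (String × List Int)) : List (String × Int) :=
  let board := pvBoard state
  let s := pvStats board
  if s.2.1 = 0 then
    -- endgame: board.index(1); none = ValueError, excluded by Pre_
    match PySem.List.index? board 1 with
    | some i => [("pile_index", (i : Int)), ("count", 1)]
    | none => []
  else
    match (if s.1 ≠ 0 then selectB_find s.2.1 s.2.2 s.1 (PySem.List.enumerate board 0) else none) with
    | some m => m
    | none =>
      match selectB_fallback (PySem.List.enumerate board 0) with
      | some m => m
      | none => []

-- ===== PRECONDITION & SPEC =====
-- Pre_ excludes exactly the boards with no pile ≥ 1 (all piles 0 or negative, including a missing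
-- "board" key): there A raises IndexError (piles_1[0] on an empty list) and B raises ValueError.
def Pre_select_move (state : List (String × List Int)) : Prop :=
  ∃ c ∈ pvBoard state, 1 ≤ c
instance (state : List (String × List Int)) : Decidable (Pre_select_move state) := by
  unfold Pre_select_move; infer_instance

def pvWitness_select_move : (List (String × List Int)) := [("board", [3, 4, 5])]

def Spec_select_move (state : List (String × List Int)) (out : List (String × Int)) : Prop := out = select_move_alt state
instance (state : List (String × List Int)) (out : List (String × Int)) : Decidable (Spec_select_move state out) := by unfold Spec_select_move; infer_instance

-- ===== CLAIM (what is proved, stated in full; the proofs are below) =====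
def Claim_equal_select_move : Prop := ∀ (state : List (String × List Int)), Dom_select_move state → Pre_select_move state → Spec_select_move state (select_move state)


-- ===== LEMMAS AND PROOFS =====

-- 0/1 indicator of a pile > 1 / == 1 (proof-side abbreviations)
def pvGt (c : Int) : Int := if 1 < c then 1 else 0
def pvOne (c : Int) : Int := if c = 1 then 1 else 0

theorem pvStats_gen (board : List Int) : ∀ (a g o : Int),
    board.foldl (fun acc c =>
      (PySem.Int.bxor acc.1 c,
       acc.2.1 + (if 1 < c then 1 else 0),
       acc.2.2 + (if c = 1 then 1 else 0))) (a, g, o)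
    = (board.foldl (fun x c => PySem.Int.bxor x c) a,
       g + (board.map pvGt).sum, o + (board.map pvOne).sum) := by
  induction board with
  | nil => simp
  | cons c rest ih => intro a g o; simp [List.foldl_cons, ih, pvGt, pvOne]; constructor <;> ring

theorem pvStats_eq (board : List Int) :
    pvStats board =
      (board.foldl (fun a c => PySem.Int.bxor a c) 0,
       (board.map pvGt).sum, (board.map pvOne).sum) := by
  simpa using pvStats_gen board 0 0 0

-- replacing the entry at key i inside a sum over (index, value) pairs with distinct indices
theorem pv_sum_replace (l : List (Int × Int)) (i count v : Int) (g : Int → Int)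
    (hnd : (l.map Prod.fst).Nodup) (hmem : (i, count) ∈ l) :
    (l.map (fun jc => if jc.1 = i then v else g jc.2)).sum
      = (l.map (fun jc => g jc.2)).sum - g count + v := by
  induction l with
  | nil => simp at hmem
  | cons p rest ih =>
    obtain ⟨j, c⟩ := p
    simp only [List.map_cons, List.nodup_cons, List.mem_map] at hnd
    rcases List.mem_cons.mp hmem with heq | hmem'
    · injection heq with h1 h2
      subst h1; subst h2
      have : ∀ q ∈ rest, (if q.1 = i then v else g q.2) = g q.2 := by
        intro q hq
        have : q.1 ≠ i := by
          intro he; exact hnd.1 ⟨q, hq, he⟩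
        simp [this]
      rw [List.map_cons, List.map_cons, List.sum_cons, List.sum_cons,
          List.map_congr_left this]
      simp; ring
    · have hji : j ≠ i := by
        rintro rfl
        exact hnd.1 ⟨(j, count), hmem', rfl⟩
      rw [List.map_cons, List.map_cons, List.sum_cons, List.sum_cons,
          ih hnd.2 hmem']
      simp [hji]; ring

theorem pv_enum_snd_sum (board : List Int) (s : Int) (g : Int → Int) :
    ((PySem.List.enumerate board s).map (fun jc => g jc.2)).sum = (board.map g).sum := by
  induction board generalizing s with
  | nil => simp [PySem.List.enumerate_nil]
  | cons c rest ih => simp [PySem.List.enumerate_cons, ih]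

theorem pv_enum_nodup_fst (board : List Int) (s : Int) :
    ((PySem.List.enumerate board s).map Prod.fst).Nodup := by
  have h := PySem.List.pairwise_lt_enumerate board s
  rw [List.Nodup, List.pairwise_map]
  exact h.imp (fun hlt => ne_of_lt hlt)

theorem pv_cntGt_eq_countP (board : List Int) :
    (board.map pvGt).sum = (board.countP (fun c => 1 < c) : Int) := by
  induction board with
  | nil => simp
  | cons c rest ih =>
    by_cases h : 1 < c
    · simp [pvGt, h, ih]; ring
    · simp [pvGt, h, ih]

theorem pv_find_eq (board : List Int) (nim : Int) (l : List (Int × Int))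
    (hsub : ∀ p ∈ l, p ∈ PySem.List.enumerate board 0) :
    selectA_find board nim l
      = selectB_find ((board.map pvGt).sum) ((board.map pvOne).sum) nim l := by
  induction l with
  | nil => rfl
  | cons p rest ih =>
    obtain ⟨i, count⟩ := p
    have hmem : (i, count) ∈ PySem.List.enumerate board 0 := hsub _ (List.mem_cons_self ..)
    have hnd := pv_enum_nodup_fst board 0
    rw [selectA_find, selectB_find]
    by_cases ht : PySem.Int.bxor count nim < count
    case neg => simp only [if_neg ht]; exact ih (fun p hp => hsub p (List.mem_cons_of_mem _ hp))
    simp only [if_pos ht]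
    set target := PySem.Int.bxor count nim with htarget
    have hrem :
        (PySem.List.enumerate board 0).foldl
          (fun acc jc =>
            acc + (if jc.1 = i then (if 1 < target then 1 else 0)
                   else (if 1 < jc.2 then 1 else 0))) (0 : Int)
        = (board.map pvGt).sum - (if 1 < count then 1 else 0) + (if 1 < target then 1 else 0) := by
      rw [PySem.List.foldl_add]
      have := pv_sum_replace (PySem.List.enumerate board 0) i count
        (if 1 < target then 1 else 0) pvGt hnd hmem
      have h2 := pv_enum_snd_sum board 0 pvGt
      simp only [pvGt] at this h2
      rw [this, h2]
      ring
    have hones :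
        (PySem.List.enumerate board 0).foldl
          (fun acc jc =>
            acc + (if (if jc.1 = i then target else jc.2) = 1 then 1 else 0)) (0 : Int)
        = (board.map pvOne).sum - (if count = 1 then 1 else 0) + (if target = 1 then 1 else 0) := by
      rw [PySem.List.foldl_add]
      simp only [apply_ite (fun v : Int => if v = 1 then (1:Int) else 0)]
      have := pv_sum_replace (PySem.List.enumerate board 0) i count
        (if target = 1 then 1 else 0) pvOne hnd hmem
      have h2 := pv_enum_snd_sum board 0 pvOne
      simp only [pvOne] at this h2
      rw [this, h2]
      ring
    have hsub0 : count - (count - target) = target := by ring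
    simp only [hrem, hones, hsub0]

theorem pv_fallback_eq (l : List (Int × Int)) :
    selectA_fallback l = selectB_fallback l := by
  induction l with
  | nil => rfl
  | cons p rest ih => cases p with | mk i c => simp [selectA_fallback, selectB_fallback, ih]

theorem pv_endgame_index (board : List Int) (s : Int) :
    (((PySem.List.enumerate board s).filter (fun p => p.2 = 1)).map Prod.fst).head?
      = (PySem.List.index? board 1).map (fun n => s + (n : Int)) := by
  induction board generalizing s with
  | nil => simp [PySem.List.enumerate_nil]
  | cons c rest ih =>
    rw [PySem.List.enumerate_cons]
    by_cases h : c = 1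
    · subst h
      rw [PySem.List.index?_cons_self]
      simp
    · rw [PySem.List.index?_cons_of_ne rest h]
      simp only [List.filter_cons, decide_eq_true_eq, if_neg h]
      rw [ih (s+1)]
      cases PySem.List.index? rest 1 <;> simp; ring

-- ===== VERDICT (by name: the statement is the Claim_ definition above) =====
theorem select_move_spec : Claim_equal_select_move := by
  intro state _ hpre
  unfold Spec_select_move select_move select_move_alt
  obtain ⟨c0, hc0mem, hc0⟩ := hpre
  simp only [pvStats_eq]
  set board := pvBoard state with hboard
  have hcnt : ((PySem.List.enumerate board 0).filter (fun p => 1 < p.2)).length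
      = board.countP (fun c => 1 < c) := by
    rw [← List.countP_eq_length_filter]
    conv_rhs => rw [← PySem.List.map_snd_enumerate board 0]
    rw [List.countP_map]
    rfl
  by_cases hend : board.countP (fun c => 1 < c) = 0
  · -- endgame on both sides
    have hA : (((PySem.List.enumerate board 0).filter (fun p => 1 < p.2)).map Prod.fst).length = 0 := by
      simp [hcnt, hend]
    have hB : (board.map pvGt).sum = 0 := by
      rw [pv_cntGt_eq_countP, hend]; rfl
    have h1mem : (1 : Int) ∈ board := by
      have := List.countP_eq_zero.mp hend c0 hc0mem
      have : c0 = 1 := by simp at this; omega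
      exact this ▸ hc0mem
    obtain ⟨n, hn⟩ := Option.isSome_iff_exists.mp ((PySem.List.index?_isSome_iff board 1).mpr h1mem)
    have hhead := pv_endgame_index board 0
    rw [hn] at hhead
    simp only [zero_add] at hhead
    have hget : PySem.List.pyGet? (((PySem.List.enumerate board 0).filter (fun p => p.2 = 1)).map Prod.fst) 0
        = some (n : Int) := by
      rw [PySem.List.pyGet?_zero, ← List.head?_eq_getElem?, hhead]
      simp
    simp only [if_pos hA, if_pos hB, hget, hn]
    split <;> rfl
  · have hA : ¬ ((((PySem.List.enumerate board 0).filter (fun p => 1 < p.2)).map Prod.fst).length = 0) := by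
      simpa [hcnt] using hend
    have hB : ¬ ((board.map pvGt).sum = 0) := by
      rw [pv_cntGt_eq_countP]
      exact_mod_cast fun h => hend (by exact_mod_cast h)
    simp only [if_neg hA, if_neg hB]
    rw [pv_find_eq board _ _ (fun p hp => hp), pv_fallback_eq]
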